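-- pv_equiv track=rewrite | github.com/medulla-tech/medulla | services/pulse2/database/msc/__init__.py | __displayLogsQueryGetIds
-- ===== SOURCE A (Python) =====
-- def __displayLogsQueryGetIds(cmds, min=0, max=-1, params={}):
--     i = 0
--     min = int(min)
--     max = int(max)
--     ids = []
--     defined = {}
--     for cmd in cmds:
--         id, fk_bundle = cmd
--         if max != -1 and max - 1 < i:
--             break
--         if i < min:
--             if (
--                 fk_bundle != "NULL"
--                 and fk_bundle is not None
--                 and fk_bundle not in defined
--             ):
--                 defined[fk_bundle] = id
--                 i += 1
--             elif fk_bundle == "NULL" or fk_bundle is None: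
--                 i += 1
--             continue
--         if (
--             fk_bundle != "NULL"
--             and fk_bundle is not None
--             and fk_bundle not in defined
--         ):
--             defined[fk_bundle] = id
--             ids.append(id)
--             i += 1
--         elif fk_bundle == "NULL" or fk_bundle is None:
--             ids.append(id)
--             i += 1
--     return ids
-- ===== SOURCE B (Python) =====
-- def __displayLogsQueryGetIds(cmds, min=0, max=-1, params={}):
--     # one dedup pass, then a separate window selection
--     min = int(min)
--     max = int(max)
--     seen = set()
--     dedup = []
--     for id, fk_bundle in cmds:
--         if fk_bundle == "NULL" or fk_bundle is None:
--             dedup.append(id)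
--         elif fk_bundle not in seen:
--             seen.add(fk_bundle)
--             dedup.append(id)
--     lo = min if min > 0 else 0
--     if max == -1:
--         return dedup[lo:]
--     if max < 0:
--         return []
--     return dedup[lo:max]
-- ===== Notes on version B (the rewrite author's own statement) =====
-- stated objective: simpler
-- what changed: Replaces A's single interleaved loop (counter, early break, skip-below-min bookkeeping) by a plain dedup pass over cmds followed by a separate slice/window step on the deduplicated id list.
import Mathlib
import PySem

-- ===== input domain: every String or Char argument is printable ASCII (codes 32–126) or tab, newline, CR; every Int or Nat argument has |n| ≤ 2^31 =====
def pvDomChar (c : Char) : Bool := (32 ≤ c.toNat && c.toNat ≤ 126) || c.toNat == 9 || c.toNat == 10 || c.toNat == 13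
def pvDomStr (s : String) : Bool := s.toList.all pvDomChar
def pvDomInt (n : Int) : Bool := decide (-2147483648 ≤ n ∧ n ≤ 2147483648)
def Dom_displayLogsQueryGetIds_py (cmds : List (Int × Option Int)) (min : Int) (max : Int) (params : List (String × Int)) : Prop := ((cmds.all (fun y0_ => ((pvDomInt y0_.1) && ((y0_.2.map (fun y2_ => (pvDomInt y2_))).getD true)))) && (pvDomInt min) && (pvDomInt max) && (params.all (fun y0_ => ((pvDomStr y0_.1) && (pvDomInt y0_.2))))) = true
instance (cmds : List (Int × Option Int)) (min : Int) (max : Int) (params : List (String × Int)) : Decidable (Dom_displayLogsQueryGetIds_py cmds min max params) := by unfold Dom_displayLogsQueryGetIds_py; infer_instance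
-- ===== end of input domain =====

-- B replaces A's single interleaved count-and-append loop (with break/continue) by a plain dedup pass followed by a separate slice/window step: simpler decomposition, same O(n) cost.


-- ===== PORT A =====
-- A's for-loop with break/continue, ported as structural recursion over cmds with the
-- same state (counter i, dict defined). At type Option Int the test fk_bundle != "NULL"
-- is always true, so only the None checks remain.
def goA_displayLogs (minv maxv : Int) : List (Int × Option Int) → Int → PySem.Dict Int Int → List Int
  | [], _, _ => []
  | (id, fk) :: rest, i, defined =>
    if maxv ≠ -1 ∧ maxv - 1 < i then []
    else if i < minv then
      match fk with
      | some v =>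
        if defined.contains v then goA_displayLogs minv maxv rest i defined
        else goA_displayLogs minv maxv rest (i + 1) (defined.insert v id)
      | none => goA_displayLogs minv maxv rest (i + 1) defined
    else
      match fk with
      | some v =>
        if defined.contains v then goA_displayLogs minv maxv rest i defined
        else id :: goA_displayLogs minv maxv rest (i + 1) (defined.insert v id)
      | none => id :: goA_displayLogs minv maxv rest (i + 1) defined

def displayLogsQueryGetIds_py (cmds : List (Int × Option Int)) (min : Int) (max : Int) (params : List (String × Int)) : List Int :=
  goA_displayLogs min max cmds 0 PySem.Dict.empty

-- ===== PORT B =====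
-- B: one dedup pass (seen-set), then a separate slice/window step.
def dedupB_displayLogs : List (Int × Option Int) → PySem.Set Int → List Int
  | [], _ => []
  | (id, fk) :: rest, seen =>
    match fk with
    | none => id :: dedupB_displayLogs rest seen
    | some v =>
      if PySem.Set.contains seen v then dedupB_displayLogs rest seen
      else id :: dedupB_displayLogs rest (PySem.Set.add seen v)

def displayLogsQueryGetIds_py_alt (cmds : List (Int × Option Int)) (min : Int) (max : Int) (params : List (String × Int)) : List Int :=
  let dedup := dedupB_displayLogs cmds PySem.Set.empty
  let lo : Int := if min > 0 then min else 0
  if max = -1 then PySem.List.slice dedup (some lo) none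
  else if max < 0 then []
  else PySem.List.slice dedup (some lo) (some max)

-- ===== PRECONDITION & SPEC =====
def Spec_displayLogsQueryGetIds_py (cmds : List (Int × Option Int)) (min : Int) (max : Int) (params : List (String × Int)) (out : List Int) : Prop := out = displayLogsQueryGetIds_py_alt cmds min max params
instance (cmds : List (Int × Option Int)) (min : Int) (max : Int) (params : List (String × Int)) (out : List Int) : Decidable (Spec_displayLogsQueryGetIds_py cmds min max params out) := by unfold Spec_displayLogsQueryGetIds_py; infer_instance

-- ===== CLAIM (what is proved, stated in full; the proofs are below) =====
def Claim_equal_displayLogsQueryGetIds_py : Prop := ∀ (cmds : List (Int × Option Int)) (min : Int) (max : Int) (params : List (String × Int)), Dom_displayLogsQueryGetIds_py cmds min max params → Spec_displayLogsQueryGetIds_py cmds min max params (displayLogsQueryGetIds_py cmds min max params)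

-- ===== LEMMAS AND PROOFS =====
-- selection by position: what A's windowing does on the deduplicated list
def selW (minv maxv i : Int) : List Int → List Int
  | [] => []
  | x :: xs =>
    if maxv ≠ -1 ∧ maxv - 1 < i then []
    else if i < minv then selW minv maxv (i + 1) xs
    else x :: selW minv maxv (i + 1) xs

theorem selW_break (minv maxv i : Int) (d : List Int) (h : maxv ≠ -1 ∧ maxv - 1 < i) :
    selW minv maxv i d = [] := by
  cases d <;> simp [selW, h]

theorem goA_eq_selW (minv maxv : Int) (cmds : List (Int × Option Int)) :
    ∀ (i : Int) (defined : PySem.Dict Int Int) (seen : PySem.Set Int),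
      (∀ v, defined.contains v = PySem.Set.contains seen v) →
      goA_displayLogs minv maxv cmds i defined = selW minv maxv i (dedupB_displayLogs cmds seen) := by
  induction cmds with
  | nil => intro i defined seen _; simp [goA_displayLogs, dedupB_displayLogs, selW]
  | cons hd rest ih =>
    intro i defined seen hinv
    obtain ⟨id, fk⟩ := hd
    by_cases hbrk : maxv ≠ -1 ∧ maxv - 1 < i
    · cases fk with
      | none => simp [goA_displayLogs, dedupB_displayLogs, selW, hbrk]
      | some v =>
        rw [show goA_displayLogs minv maxv ((id, some v) :: rest) i defined = [] by
              simp [goA_displayLogs, hbrk]]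
        by_cases hv : PySem.Set.contains seen v
        · have hv' : v ∈ seen := by simpa [pysem] using hv
          rw [show dedupB_displayLogs ((id, some v) :: rest) seen
                  = dedupB_displayLogs rest seen by simp [dedupB_displayLogs, hv']]
          rw [selW_break _ _ _ _ hbrk]
        · have hv' : v ∉ seen := by simpa [pysem] using hv
          rw [show dedupB_displayLogs ((id, some v) :: rest) seen
                  = id :: dedupB_displayLogs rest (PySem.Set.add seen v) by
                simp [dedupB_displayLogs, hv']]
          simp [selW, hbrk]
    · have hbrk2 : maxv = -1 ∨ i ≤ maxv - 1 := by
        by_cases h1 : maxv = -1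
        · exact Or.inl h1
        · exact Or.inr (by omega)
      have hc : ¬(¬maxv = -1 ∧ maxv ≤ i) := by omega
      cases fk with
      | none =>
        by_cases hlt : i < minv <;>
          simp [goA_displayLogs, dedupB_displayLogs, selW, hc, hlt, ih _ _ _ hinv]
      | some v =>
        by_cases hv : PySem.Set.contains seen v
        · have hv' : v ∈ seen := by simpa [pysem] using hv
          have hd : defined.contains v = true := by rw [hinv]; exact hv
          by_cases hlt : i < minv <;>
            simp [goA_displayLogs, dedupB_displayLogs, hc, hlt, hd, hv',
                  ih _ _ _ hinv]
        · have hv' : v ∉ seen := by simpa [pysem] using hv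
          have hd : defined.contains v = false := by rw [hinv]; simpa using hv
          have hinv' : ∀ w, (defined.insert v id).contains w
              = PySem.Set.contains (PySem.Set.add seen v) w := by
            intro w
            by_cases hw : v = w
            · subst hw; simp [pysem]
            · have := hinv w
              simp only [pysem] at this ⊢
              simp [PySem.Set.mem_add, this, Bool.or_comm]
          by_cases hlt : i < minv <;>
            simp [goA_displayLogs, dedupB_displayLogs, selW, hc, hlt, hd, hv',
                  ih _ _ _ hinv']

theorem selW_neg_one (minv : Int) (d : List Int) :
    ∀ i : Int, selW minv (-1) i d = d.drop (minv - i).toNat := by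
  induction d with
  | nil => intro i; simp [selW]
  | cons x xs ih =>
    intro i
    by_cases hlt : i < minv
    · have h1 : (minv - i).toNat = ((minv - (i + 1)).toNat) + 1 := by omega
      simp [selW, hlt, h1, ih]
    · have h0 : (minv - i).toNat = 0 := by omega
      have h1 : (minv - (i + 1)).toNat = 0 := by omega
      simp [selW, hlt, h0, h1, ih]

theorem selW_nonneg (minv maxv : Int) (hmax : 0 ≤ maxv) (d : List Int) :
    ∀ i : Int, selW minv maxv i d = (d.take (maxv - i).toNat).drop (minv - i).toNat := by
  induction d with
  | nil => intro i; simp [selW]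
  | cons x xs ih =>
    intro i
    by_cases hbrk : maxv - 1 < i
    · have h0 : (maxv - i).toNat = 0 := by omega
      have hne : maxv ≠ -1 ∧ maxv - 1 < i := ⟨by omega, hbrk⟩
      simp [selW, hne, h0]
    · have hne : ¬ (maxv ≠ -1 ∧ maxv - 1 < i) := by omega
      have ht : (maxv - i).toNat = (maxv - (i + 1)).toNat + 1 := by omega
      by_cases hlt : i < minv
      · have h1 : (minv - i).toNat = ((minv - (i + 1)).toNat) + 1 := by omega
        simp [selW, hlt, ht, h1, ih]
        all_goals omega
      · have h0 : (minv - i).toNat = 0 := by omega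
        have h1 : (minv - (i + 1)).toNat = 0 := by omega
        simp [selW, hlt, ht, h0, h1, ih]
        all_goals omega

-- ===== VERDICT (by name: the statement is the Claim_ definition above) =====
theorem displayLogsQueryGetIds_py_spec : Claim_equal_displayLogsQueryGetIds_py := by
  intro cmds minv maxv params _
  unfold Spec_displayLogsQueryGetIds_py displayLogsQueryGetIds_py displayLogsQueryGetIds_py_alt
  rw [goA_eq_selW minv maxv cmds 0 PySem.Dict.empty PySem.Set.empty (by intro v; simp [pysem])]
  set d := dedupB_displayLogs cmds PySem.Set.empty with hd
  have hlo : (if minv > 0 then minv else 0) = (minv.toNat : Int) := by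
    split <;> omega
  by_cases h1 : maxv = -1
  · subst h1
    simp only [hlo, selW_neg_one, PySem.List.slice_from_natCast]
    congr 1; omega
  · by_cases h2 : maxv < 0
    · rw [selW_break _ _ _ _ ⟨h1, by omega⟩]
      simp [h1, h2]
    · rw [selW_nonneg minv maxv (by omega) d 0]
      rw [if_neg h1, if_neg h2, hlo,
        PySem.List.slice_toNat d (by positivity) (by omega)]
      rw [List.drop_take]
      have e1 : (maxv - 0).toNat - (minv - 0).toNat = maxv.toNat - ((minv.toNat : Int)).toNat := by omega
      have e2 : (minv - 0).toNat = ((minv.toNat : Int)).toNat := by omega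
      rw [e1, e2]
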